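-- pv_equiv track=rewrite | github.com/mholgatem/FiniteStateMachine | grade_fsm.py | categorize_columns
-- ===== SOURCE A (Python) =====
-- from typing import Dict, Iterable, List, Mapping, MutableMapping, Optional, Tuple
--
-- def categorize_columns(
--     value_columns: Iterable[Mapping[str, object]],
-- ) -> Tuple[List[Mapping[str, object]], List[Mapping[str, object]], List[Mapping[str, object]], List[Mapping[str, object]]]:
--     """Split transition table columns into the four column groups."""
--
--     current_state_cols: List[Mapping[str, object]] = []
--     input_cols: List[Mapping[str, object]] = []
--     next_state_cols: List[Mapping[str, object]] = []
--     output_cols: List[Mapping[str, object]] = []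
--     for col in value_columns:
--         base_key = col.get("baseKey") or str(col.get("key", "")).split("__", maxsplit=1)[0]
--         if not base_key or col.get("type") == "spacer":
--             continue
--         if base_key.startswith("q_"):
--             current_state_cols.append({**col, "baseKey": base_key})
--         elif base_key.startswith("next_q_"):
--             next_state_cols.append({**col, "baseKey": base_key})
--         elif base_key.startswith("in_"):
--             input_cols.append({**col, "baseKey": base_key})
--         elif base_key.startswith("out_"):
--             output_cols.append({**col, "baseKey": base_key})
--     current_state_cols.sort(key=lambda c: c["baseKey"], reverse=True)
--     next_state_cols.sort(key=lambda c: c["baseKey"], reverse=True)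
--     input_cols.sort(key=lambda c: c["baseKey"])
--     output_cols.sort(key=lambda c: c["baseKey"])
--     return current_state_cols, input_cols, next_state_cols, output_cols
-- ===== SOURCE B (Python) =====
-- def categorize_columns(value_columns):
--     """Split transition table columns into the four column groups."""
--     tagged = []
--     for col in value_columns:
--         base_key = col.get("baseKey") or str(col.get("key", "")).split("__", maxsplit=1)[0]
--         if base_key and col.get("type") != "spacer":
--             tagged.append((base_key, {**col, "baseKey": base_key}))
--     asc = sorted(tagged, key=lambda t: t[0])
--     desc = sorted(tagged, key=lambda t: t[0], reverse=True)
--     current_state_cols = [d for k, d in desc if k.startswith("q_")]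
--     input_cols = [d for k, d in asc if k.startswith("in_")]
--     next_state_cols = [d for k, d in desc if k.startswith("next_q_")]
--     output_cols = [d for k, d in asc if k.startswith("out_")]
--     return current_state_cols, input_cols, next_state_cols, output_cols
-- ===== Notes on version B (the rewrite author's own statement) =====
-- stated objective: alternative
-- what changed: A partition-and-append loop with four per-group sorts is replaced by one tag-and-filter pass followed by two global stable sorts (ascending and descending) from which each group is extracted by prefix filtering, dropping the redundant elif negation tests.
import Mathlib
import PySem

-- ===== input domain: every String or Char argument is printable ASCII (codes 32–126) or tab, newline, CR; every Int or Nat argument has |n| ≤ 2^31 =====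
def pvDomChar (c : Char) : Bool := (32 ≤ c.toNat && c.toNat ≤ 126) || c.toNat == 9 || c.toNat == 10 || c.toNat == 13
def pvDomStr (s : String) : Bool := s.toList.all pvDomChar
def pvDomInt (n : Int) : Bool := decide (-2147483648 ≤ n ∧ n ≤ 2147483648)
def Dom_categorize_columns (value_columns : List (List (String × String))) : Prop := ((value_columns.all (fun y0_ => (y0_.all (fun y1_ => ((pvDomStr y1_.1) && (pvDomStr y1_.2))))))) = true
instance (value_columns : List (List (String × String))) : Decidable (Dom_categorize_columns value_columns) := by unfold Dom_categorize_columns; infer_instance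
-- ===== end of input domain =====

-- B replaces A's four per-group sorts by one tag-and-filter pass plus two global stable sorts
-- (ascending and descending) from which each group is extracted by prefix filtering; objective: alternative.

-- ===== PORT A =====
-- shared line of both Pythons: base_key = col.get("baseKey") or str(col.get("key", "")).split("__", maxsplit=1)[0]
-- (split with the non-empty separator "__" never fails and never returns an empty list, so getD/headD defaults are unreachable)
def pvBaseKey (col : List (String × String)) : String :=
  let d : PySem.Dict String String := PySem.Dict.ofList col
  let bk := d.getD "baseKey" ""   -- a missing key (None) and "" are both falsy: the same default
  if bk == "" then ((PySem.Str.splitMax? (d.getD "key" "") "__" 1).getD []).headD "" else bk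

-- shared: col.get("type") == "spacer"  (missing key: None == "spacer" is False, as is "" == "spacer")
def pvSpacer (col : List (String × String)) : Bool :=
  (PySem.Dict.ofList col).getD "type" "" == "spacer"

-- shared: {**col, "baseKey": base_key}  (overwrite keeps the position, a new key is appended)
def pvAnnot (col : List (String × String)) : List (String × String) :=
  ((PySem.Dict.ofList col).insert "baseKey" (pvBaseKey col)).items

-- sort key lambda c: c["baseKey"] — every dict reaching a sort carries "baseKey", so the default is unreachable
def pvKeyD (c : List (String × String)) : String := (PySem.Dict.mk c).getD "baseKey" ""

def categorize_columns (value_columns : List (List (String × String))) : (List (List (String × String))) × (List (List (String × String))) × (List (List (String × String))) × (List (List (String × String))) :=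
  let r := value_columns.foldl (fun acc col =>
    let bk := pvBaseKey col
    if bk == "" || pvSpacer col then acc
    else if PySem.Str.startswith bk "q_" then (acc.1 ++ [pvAnnot col], acc.2.1, acc.2.2.1, acc.2.2.2)
    else if PySem.Str.startswith bk "next_q_" then (acc.1, acc.2.1, acc.2.2.1 ++ [pvAnnot col], acc.2.2.2)
    else if PySem.Str.startswith bk "in_" then (acc.1, acc.2.1 ++ [pvAnnot col], acc.2.2.1, acc.2.2.2)
    else if PySem.Str.startswith bk "out_" then (acc.1, acc.2.1, acc.2.2.1, acc.2.2.2 ++ [pvAnnot col])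
    else acc)
    (([], [], [], []) : (List (List (String × String))) × (List (List (String × String))) × (List (List (String × String))) × (List (List (String × String))))
  (PySem.List.sorted r.1 pvKeyD true, PySem.List.sorted r.2.1 pvKeyD,
   PySem.List.sorted r.2.2.1 pvKeyD true, PySem.List.sorted r.2.2.2 pvKeyD)

-- ===== PORT B =====
-- B's keep test: base_key and col.get("type") != "spacer"
def pvKeep (col : List (String × String)) : Bool := !(pvBaseKey col == "") && !(pvSpacer col)

def categorize_columns_alt (value_columns : List (List (String × String))) : (List (List (String × String))) × (List (List (String × String))) × (List (List (String × String))) × (List (List (String × String))) :=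
  let tagged := value_columns.foldl (fun acc col =>
    if pvKeep col then acc ++ [(pvBaseKey col, pvAnnot col)] else acc) []
  let asc := PySem.List.sorted tagged (fun t => t.1)
  let desc := PySem.List.sorted tagged (fun t => t.1) true
  ((desc.filter (fun t => PySem.Str.startswith t.1 "q_")).map (fun t => t.2),
   (asc.filter (fun t => PySem.Str.startswith t.1 "in_")).map (fun t => t.2),
   (desc.filter (fun t => PySem.Str.startswith t.1 "next_q_")).map (fun t => t.2),
   (asc.filter (fun t => PySem.Str.startswith t.1 "out_")).map (fun t => t.2))

-- ===== PRECONDITION & SPEC =====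
def Spec_categorize_columns (value_columns : List (List (String × String))) (out : (List (List (String × String))) × (List (List (String × String))) × (List (List (String × String))) × (List (List (String × String)))) : Prop := out = categorize_columns_alt value_columns
instance (value_columns : List (List (String × String))) (out : (List (List (String × String))) × (List (List (String × String))) × (List (List (String × String))) × (List (List (String × String)))) : Decidable (Spec_categorize_columns value_columns out) := by unfold Spec_categorize_columns; infer_instance

-- ===== CLAIM (what is proved, stated in full; the proofs are below) =====
def Claim_equal_categorize_columns : Prop := ∀ (value_columns : List (List (String × String))), Dom_categorize_columns value_columns → Spec_categorize_columns value_columns (categorize_columns value_columns)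

-- ===== LEMMAS AND PROOFS =====

-- inserting an element that goes before everything puts it at the head
theorem pv_insertBy_front {α : Type} (bef : α → α → Bool) (x : α) (l : List α)
    (h : ∀ z ∈ l, bef x z = true) : PySem.List.insertBy bef x l = x :: l := by
  cases l with
  | nil => rfl
  | cons y ys => simp [PySem.List.insertBy, h y (List.mem_cons_self)]

-- insertBy preserves the sortedness invariant r (parametric in the comparison: covers asc and desc)
theorem pv_pairwise_insertBy {α : Type} (r : α → α → Prop) (bef : α → α → Bool)
    (hT : ∀ a b, bef a b = true → r a b) (hF : ∀ a b, bef a b = false → r b a)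
    (hPar : ∀ a b c, bef a b = true → r b c → bef a c = true)
    (x : α) (l : List α) (hl : l.Pairwise r) : (PySem.List.insertBy bef x l).Pairwise r := by
  induction l with
  | nil => simp [PySem.List.insertBy, hl]
  | cons y ys ih =>
    rcases List.pairwise_cons.mp hl with ⟨hy, hys⟩
    by_cases hb : bef x y = true
    · simp only [PySem.List.insertBy, hb, if_pos]
      refine List.pairwise_cons.mpr ⟨?_, hl⟩
      intro z hz
      rcases List.mem_cons.mp hz with rfl | hz
      · exact hT _ _ hb
      · exact hT _ _ (hPar _ _ _ hb (hy z hz))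
    · simp only [PySem.List.insertBy, hb, if_neg, Bool.false_eq_true, not_false_iff]
      refine List.pairwise_cons.mpr ⟨?_, ih hys⟩
      intro z hz
      rcases (PySem.List.mem_insertBy _ _ _ _).mp hz with rfl | hz
      · exact hF _ _ (Bool.eq_false_iff.mpr hb ▸ rfl)
      · exact hy z hz

-- filtering commutes with a single stable insertion into a sorted list
theorem pv_filter_insertBy {α : Type} (r : α → α → Prop) (bef : α → α → Bool)
    (hPar : ∀ a b c, bef a b = true → r b c → bef a c = true)
    (p : α → Bool) (x : α) (l : List α) (hl : l.Pairwise r) :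
    (PySem.List.insertBy bef x l).filter p =
      if p x then PySem.List.insertBy bef x (l.filter p) else l.filter p := by
  induction l with
  | nil => by_cases hx : p x = true <;> simp [PySem.List.insertBy, List.filter, hx]
  | cons y ys ih =>
    rcases List.pairwise_cons.mp hl with ⟨hy, hys⟩
    by_cases hb : bef x y = true
    · have hfront : ∀ z ∈ (y :: ys).filter p, bef x z = true := by
        intro z hz
        rcases List.mem_cons.mp (List.mem_of_mem_filter hz) with rfl | hz'
        · exact hb
        · exact hPar _ _ _ hb (hy z hz')
      simp only [PySem.List.insertBy, hb, if_pos]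
      by_cases hx : p x = true
      · rw [List.filter_cons_of_pos hx, if_pos hx, pv_insertBy_front bef x _ hfront]
      · rw [List.filter_cons_of_neg (by simp [hx]), if_neg (by simp [hx])]
    · simp only [PySem.List.insertBy, hb, if_neg, Bool.false_eq_true, not_false_iff]
      by_cases hy' : p y = true
      · rw [List.filter_cons_of_pos hy', ih hys, List.filter_cons_of_pos hy']
        by_cases hx : p x = true
        · rw [if_pos hx, if_pos hx]
          simp [PySem.List.insertBy, hb]
        · rw [if_neg (by simp [hx]), if_neg (by simp [hx])]
      · rw [List.filter_cons_of_neg (by simp [hy']), ih hys, List.filter_cons_of_neg (by simp [hy'])]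

-- filtering commutes with the whole insertion-sort fold
theorem pv_filter_foldl_insertBy {α : Type} (r : α → α → Prop) (bef : α → α → Bool)
    (hT : ∀ a b, bef a b = true → r a b) (hF : ∀ a b, bef a b = false → r b a)
    (hPar : ∀ a b c, bef a b = true → r b c → bef a c = true)
    (p : α → Bool) (xs : List α) :
    ∀ acc : List α, acc.Pairwise r →
      (xs.foldl (fun a y => PySem.List.insertBy bef y a) acc).filter p =
      (xs.filter p).foldl (fun a y => PySem.List.insertBy bef y a) (acc.filter p) := by
  induction xs with
  | nil => intro acc _; rfl
  | cons x xs ih =>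
    intro acc hacc
    by_cases hx : p x = true
    · rw [List.filter_cons_of_pos hx]
      simp only [List.foldl_cons]
      rw [ih _ (pv_pairwise_insertBy r bef hT hF hPar x acc hacc),
        pv_filter_insertBy r bef hPar p x acc hacc, if_pos hx]
    · rw [List.filter_cons_of_neg (by simp [hx])]
      simp only [List.foldl_cons]
      rw [ih _ (pv_pairwise_insertBy r bef hT hF hPar x acc hacc),
        pv_filter_insertBy r bef hPar p x acc hacc, if_neg (by simp [hx])]

-- filter commutes with Python's stable sort (ascending)
theorem pv_filter_sorted {α κ : Type} [LinearOrder κ] (xs : List α) (key : α → κ) (p : α → Bool) :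
    (PySem.List.sorted xs key).filter p = PySem.List.sorted (xs.filter p) key := by
  rw [PySem.List.sorted_eq_foldl_insertBy, PySem.List.sorted_eq_foldl_insertBy]
  exact pv_filter_foldl_insertBy (fun a b => key a ≤ key b) _
    (fun a b h => le_of_lt (by simpa using h))
    (fun a b h => le_of_not_gt (by simpa using h))
    (fun a b c h1 h2 => by simp only [decide_eq_true_eq] at *; exact lt_of_lt_of_le h1 h2)
    p xs [] (List.Pairwise.nil)

-- filter commutes with Python's stable sort (reverse=True)
theorem pv_filter_sorted_rev {α κ : Type} [LinearOrder κ] (xs : List α) (key : α → κ) (p : α → Bool) :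
    (PySem.List.sorted xs key true).filter p = PySem.List.sorted (xs.filter p) key true := by
  rw [PySem.List.sorted_rev_eq_foldl_insertBy, PySem.List.sorted_rev_eq_foldl_insertBy]
  exact pv_filter_foldl_insertBy (fun a b => key b ≤ key a) _
    (fun a b h => le_of_lt (by simpa using h))
    (fun a b h => le_of_not_gt (by simpa using h))
    (fun a b c h1 h2 => by simp only [decide_eq_true_eq] at *; exact lt_of_le_of_lt h2 h1)
    p xs [] (List.Pairwise.nil)

-- map commutes with insertBy when the comparison factors through the map
theorem pv_map_insertBy {α β : Type} (f : α → β) (bef : α → α → Bool) (bef' : β → β → Bool)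
    (h : ∀ a b, bef' (f a) (f b) = bef a b) (x : α) (l : List α) :
    (PySem.List.insertBy bef x l).map f = PySem.List.insertBy bef' (f x) (l.map f) := by
  induction l with
  | nil => rfl
  | cons y ys ih =>
    simp only [PySem.List.insertBy, List.map_cons, h x y]
    by_cases hb : bef x y = true <;> simp [hb, ih]

-- map commutes with the whole sort (both directions)
theorem pv_sorted_map {α β κ : Type} [LinearOrder κ] (f : α → β) (key : β → κ)
    (xs : List α) (rev : Bool) :
    PySem.List.sorted (xs.map f) key rev = (PySem.List.sorted xs (fun a => key (f a)) rev).map f := by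
  cases rev
  · rw [PySem.List.sorted_eq_foldl_insertBy, PySem.List.sorted_eq_foldl_insertBy]
    induction xs using List.reverseRecOn with
    | nil => rfl
    | append_singleton xs x ih =>
      simp only [List.map_append, List.map_cons, List.map_nil, List.foldl_append, List.foldl_cons,
        List.foldl_nil, ih]
      exact (pv_map_insertBy f _ _ (fun a b => rfl) x _).symm
  · rw [PySem.List.sorted_rev_eq_foldl_insertBy, PySem.List.sorted_rev_eq_foldl_insertBy]
    induction xs using List.reverseRecOn with
    | nil => rfl
    | append_singleton xs x ih =>
      simp only [List.map_append, List.map_cons, List.map_nil, List.foldl_append, List.foldl_cons,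
        List.foldl_nil, ih]
      exact (pv_map_insertBy f _ _ (fun a b => rfl) x _).symm

-- two incomparable prefixes cannot both start the same string
theorem pv_sw_excl (s a b : String) (hab : ¬ (a.toList <+: b.toList)) (hba : ¬ (b.toList <+: a.toList))
    (ha : PySem.Str.startswith s a = true) : PySem.Str.startswith s b = false := by
  rw [PySem.Str.startswith_eq, PySem.Chars.startswith_iff] at ha
  rw [PySem.Str.startswith_eq]
  refine Bool.eq_false_iff.mpr (fun hb => ?_)
  rw [PySem.Chars.startswith_iff] at hb
  rcases List.prefix_or_prefix_of_prefix ha hb with h | h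
  exacts [hab h, hba h]

-- the annotated dict's "baseKey" entry is the computed base key
theorem pv_keyD_annot (c : List (String × String)) : pvKeyD (pvAnnot c) = pvBaseKey c := by
  have : PySem.Dict.mk (pvAnnot c) = (PySem.Dict.ofList c).insert "baseKey" (pvBaseKey c) := rfl
  rw [pvKeyD, this, PySem.Dict.getD_insert_self]


-- ===== proof-only helpers: the four branch predicates of A's loop =====
def pvSW (pre : String) (c : List (String × String)) : Bool := PySem.Str.startswith (pvBaseKey c) pre

def pvApp (p : List (String × String) → Bool) (l : List (List (String × String))) (c : List (String × String)) : List (List (String × String)) :=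
  if p c then l ++ [pvAnnot c] else l

def pvQ1 (c : List (String × String)) : Bool := pvKeep c && pvSW "q_" c
def pvQ2 (c : List (String × String)) : Bool := pvKeep c && !pvSW "q_" c && !pvSW "next_q_" c && pvSW "in_" c
def pvQ3 (c : List (String × String)) : Bool := pvKeep c && !pvSW "q_" c && pvSW "next_q_" c
def pvQ4 (c : List (String × String)) : Bool := pvKeep c && !pvSW "q_" c && !pvSW "next_q_" c && !pvSW "in_" c && pvSW "out_" c

def pvPair (c : List (String × String)) : String × List (String × String) := (pvBaseKey c, pvAnnot c)

-- A's four-accumulator loop is four independent filtered appends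
theorem pvA_fold (vc : List (List (String × String))) :
    (vc.foldl (fun acc col =>
      let bk := pvBaseKey col
      if bk == "" || pvSpacer col then acc
      else if PySem.Str.startswith bk "q_" then (acc.1 ++ [pvAnnot col], acc.2.1, acc.2.2.1, acc.2.2.2)
      else if PySem.Str.startswith bk "next_q_" then (acc.1, acc.2.1, acc.2.2.1 ++ [pvAnnot col], acc.2.2.2)
      else if PySem.Str.startswith bk "in_" then (acc.1, acc.2.1 ++ [pvAnnot col], acc.2.2.1, acc.2.2.2)
      else if PySem.Str.startswith bk "out_" then (acc.1, acc.2.1, acc.2.2.1, acc.2.2.2 ++ [pvAnnot col])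
      else acc)
      (([], [], [], []) : (List (List (String × String))) × (List (List (String × String))) × (List (List (String × String))) × (List (List (String × String))))) =
    ((vc.filter pvQ1).map pvAnnot, (vc.filter pvQ2).map pvAnnot,
     (vc.filter pvQ3).map pvAnnot, (vc.filter pvQ4).map pvAnnot) := by
  have hbody : (fun (acc : (List (List (String × String))) × (List (List (String × String))) × (List (List (String × String))) × (List (List (String × String)))) col =>
      let bk := pvBaseKey col
      if bk == "" || pvSpacer col then acc
      else if PySem.Str.startswith bk "q_" then (acc.1 ++ [pvAnnot col], acc.2.1, acc.2.2.1, acc.2.2.2)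
      else if PySem.Str.startswith bk "next_q_" then (acc.1, acc.2.1, acc.2.2.1 ++ [pvAnnot col], acc.2.2.2)
      else if PySem.Str.startswith bk "in_" then (acc.1, acc.2.1 ++ [pvAnnot col], acc.2.2.1, acc.2.2.2)
      else if PySem.Str.startswith bk "out_" then (acc.1, acc.2.1, acc.2.2.1, acc.2.2.2 ++ [pvAnnot col])
      else acc) =
      (fun acc col => (pvApp pvQ1 acc.1 col,
        (fun (s : (List (List (String × String))) × (List (List (String × String))) × (List (List (String × String)))) col =>
          (pvApp pvQ2 s.1 col,
            (fun (t : (List (List (String × String))) × (List (List (String × String)))) col =>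
              (pvApp pvQ3 t.1 col, pvApp pvQ4 t.2 col)) s.2 col)) acc.2 col)) := by
    funext acc col
    cases hbk : (pvBaseKey col == "") <;> cases hsp : pvSpacer col <;>
      cases hq : PySem.Str.startswith (pvBaseKey col) "q_" <;>
      cases hn : PySem.Str.startswith (pvBaseKey col) "next_q_" <;>
      cases hi : PySem.Str.startswith (pvBaseKey col) "in_" <;>
      cases ho : PySem.Str.startswith (pvBaseKey col) "out_" <;>
      simp only [pvApp, pvQ1, pvQ2, pvQ3, pvQ4, pvKeep, pvSW, hbk, hsp, hq, hn, hi, ho] <;> rfl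
  rw [hbody]
  rw [PySem.List.foldl_prod_mk (f := pvApp pvQ1)
        (g := fun s col => (pvApp pvQ2 s.1 col,
          (fun (t : (List (List (String × String))) × (List (List (String × String)))) col =>
            (pvApp pvQ3 t.1 col, pvApp pvQ4 t.2 col)) s.2 col))]
  rw [PySem.List.foldl_prod_mk (f := pvApp pvQ2)
        (g := fun (t : (List (List (String × String))) × (List (List (String × String)))) col =>
          (pvApp pvQ3 t.1 col, pvApp pvQ4 t.2 col))]
  rw [PySem.List.foldl_prod_mk (f := pvApp pvQ3) (g := pvApp pvQ4)]
  rw [show pvApp pvQ1 = (fun acc x => if pvQ1 x then acc ++ [pvAnnot x] else acc) from rfl,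
    show pvApp pvQ2 = (fun acc x => if pvQ2 x then acc ++ [pvAnnot x] else acc) from rfl,
    show pvApp pvQ3 = (fun acc x => if pvQ3 x then acc ++ [pvAnnot x] else acc) from rfl,
    show pvApp pvQ4 = (fun acc x => if pvQ4 x then acc ++ [pvAnnot x] else acc) from rfl]
  rw [PySem.List.foldl_append_if pvQ1 pvAnnot, PySem.List.foldl_append_if pvQ2 pvAnnot,
    PySem.List.foldl_append_if pvQ3 pvAnnot, PySem.List.foldl_append_if pvQ4 pvAnnot]
  simp

-- B's tagging loop is a filtered map
theorem pvB_fold (vc : List (List (String × String))) :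
    (vc.foldl (fun acc col => if pvKeep col then acc ++ [(pvBaseKey col, pvAnnot col)] else acc)
      ([] : List (String × List (String × String)))) = (vc.filter pvKeep).map pvPair := by
  simpa using PySem.List.foldl_append_if pvKeep pvPair vc []

-- a prefix-filtered slice of B's globally sorted tag list is A's per-group sort
theorem pv_group (pre : String) (rev : Bool) (vc : List (List (String × String))) :
    ((PySem.List.sorted ((vc.filter pvKeep).map pvPair) (fun t => t.1) rev).filter
        (fun t => PySem.Str.startswith t.1 pre)).map (fun t => t.2) =
    PySem.List.sorted ((vc.filter (fun c => pvKeep c && pvSW pre c)).map pvAnnot) pvKeyD rev := by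
  have hkey : (fun c => pvKeyD (pvAnnot c)) = pvBaseKey := funext pv_keyD_annot
  rw [pv_sorted_map pvPair (fun t => t.1) _ rev]
  have h1 : (fun c => (pvPair c).1) = pvBaseKey := rfl
  rw [h1, List.filter_map, List.map_map]
  have h2 : ((fun (t : String × List (String × String)) => t.2) ∘ pvPair) = pvAnnot := rfl
  have h3 : ((fun (t : String × List (String × String)) => PySem.Str.startswith t.1 pre) ∘ pvPair) = pvSW pre := rfl
  rw [h2, h3]
  rw [pv_sorted_map pvAnnot pvKeyD _ rev, hkey]
  cases rev
  · rw [pv_filter_sorted, List.filter_filter,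
      List.filter_congr (q := fun c => pvKeep c && pvSW pre c) (fun c _ => Bool.and_comm _ _)]
  · rw [pv_filter_sorted_rev, List.filter_filter,
      List.filter_congr (q := fun c => pvKeep c && pvSW pre c) (fun c _ => Bool.and_comm _ _)]

-- startswith exclusivity between the four concrete prefixes
theorem pv_in_excl (c : List (String × String)) (h : pvSW "in_" c = true) :
    pvSW "q_" c = false ∧ pvSW "next_q_" c = false :=
  ⟨pv_sw_excl _ "in_" "q_" (by decide) (by decide) h,
   pv_sw_excl _ "in_" "next_q_" (by decide) (by decide) h⟩

theorem pv_next_excl (c : List (String × String)) (h : pvSW "next_q_" c = true) :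
    pvSW "q_" c = false :=
  pv_sw_excl _ "next_q_" "q_" (by decide) (by decide) h

theorem pv_out_excl (c : List (String × String)) (h : pvSW "out_" c = true) :
    pvSW "q_" c = false ∧ pvSW "next_q_" c = false ∧ pvSW "in_" c = false :=
  ⟨pv_sw_excl _ "out_" "q_" (by decide) (by decide) h,
   pv_sw_excl _ "out_" "next_q_" (by decide) (by decide) h,
   pv_sw_excl _ "out_" "in_" (by decide) (by decide) h⟩

-- the extra negated tests in A's elif chain are redundant for each prefix
theorem pvQ2_eq (c : List (String × String)) : pvQ2 c = (pvKeep c && pvSW "in_" c) := by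
  cases hi : pvSW "in_" c
  · simp [pvQ2, hi]
  · obtain ⟨h1, h2⟩ := pv_in_excl c hi
    simp [pvQ2, hi, h1, h2]

theorem pvQ3_eq (c : List (String × String)) : pvQ3 c = (pvKeep c && pvSW "next_q_" c) := by
  cases hn : pvSW "next_q_" c
  · simp [pvQ3, hn]
  · simp [pvQ3, hn, pv_next_excl c hn]

theorem pvQ4_eq (c : List (String × String)) : pvQ4 c = (pvKeep c && pvSW "out_" c) := by
  cases ho : pvSW "out_" c
  · simp [pvQ4, ho]
  · obtain ⟨h1, h2, h3⟩ := pv_out_excl c ho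
    simp [pvQ4, ho, h1, h2, h3]

theorem pvQ1_eq (c : List (String × String)) : pvQ1 c = (pvKeep c && pvSW "q_" c) := rfl

-- ===== VERDICT (by name: the statement is the Claim_ definition above) =====
theorem categorize_columns_spec : Claim_equal_categorize_columns := by
  intro vc _
  unfold Spec_categorize_columns
  simp only [categorize_columns, categorize_columns_alt]
  rw [pvA_fold, pvB_fold]
  rw [pv_group "q_" true vc, pv_group "in_" false vc, pv_group "next_q_" true vc,
    pv_group "out_" false vc]
  rw [List.filter_congr (fun c _ => pvQ1_eq c), List.filter_congr (fun c _ => pvQ2_eq c),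
    List.filter_congr (fun c _ => pvQ3_eq c), List.filter_congr (fun c _ => pvQ4_eq c)]
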